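-- pv_equiv track=rewrite | github.com/mcpower/adventofcode | 2021/22/utils.py | points_to_grid
-- ===== SOURCE A (Python) =====
-- import copy
-- import typing
--
-- def make_grid(*dimensions: typing.List[int], fill=None):
--     "Returns a grid such that 'dimensions' is juuust out of bounds."
--     if len(dimensions) == 1:
--         return [fill for _ in range(dimensions[0])]
--     next_down = make_grid(*dimensions[1:], fill=fill)
--     return [copy.deepcopy(next_down) for _ in range(dimensions[0])]
--
-- def points_sub_min(points):
--     m = [min(p[i] for p in points) for i in range(len(points[0]))]
--     return [psub(p, m) for p in points]
--
-- def points_to_grid(points, sub_min=True, flip=True):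
--     if sub_min:
--         points = points_sub_min(points)
--     if not flip:
--         points = [(y, x) for x, y in points]
--     grid = make_grid(max(map(snd, points))+1, max(map(fst, points))+1, fill='.')
--     for x, y in points:
--         grid[y][x] = '#'
--     return grid
--
-- def fst(x):
--     return x[0]
--
-- def snd(x):
--     return x[1]
--
-- def psub(x, y):
--     return [a-b for a, b in zip(x, y)]
-- ===== SOURCE B (Python) =====
-- def points_to_grid(points, sub_min=True, flip=True):
--     if sub_min:
--         mx = min(x for x, y in points)
--         my = min(y for x, y in points)
--         points = [(x - mx, y - my) for x, y in points]
--     if not flip: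
--         points = [(y, x) for x, y in points]
--     w = max(x for x, y in points) + 1
--     h = max(y for x, y in points) + 1
--     rows = {}
--     for x, y in points:
--         rows.setdefault(y, set()).add(x)
--     grid = []
--     for y in range(h):
--         row = []
--         prev = -1
--         for x in sorted(rows.get(y, ())):
--             row.extend(['.'] * (x - prev - 1))
--             row.append('#')
--             prev = x
--         row.extend(['.'] * (w - prev - 1))
--         grid.append(row)
--     return grid
-- ===== Notes on version B (the rewrite author's own statement) =====
-- stated objective: alternative
-- what changed: B never materialises a prefilled grid: it groups the transformed points into a dict row-index -> set of columns, then emits each row by sorting that row's columns and concatenating '.'-runs between consecutive '#' marks (run-length construction), instead of A's make_grid prefill with deepcopied rows followed by per-point cell mutation.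
import Mathlib
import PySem

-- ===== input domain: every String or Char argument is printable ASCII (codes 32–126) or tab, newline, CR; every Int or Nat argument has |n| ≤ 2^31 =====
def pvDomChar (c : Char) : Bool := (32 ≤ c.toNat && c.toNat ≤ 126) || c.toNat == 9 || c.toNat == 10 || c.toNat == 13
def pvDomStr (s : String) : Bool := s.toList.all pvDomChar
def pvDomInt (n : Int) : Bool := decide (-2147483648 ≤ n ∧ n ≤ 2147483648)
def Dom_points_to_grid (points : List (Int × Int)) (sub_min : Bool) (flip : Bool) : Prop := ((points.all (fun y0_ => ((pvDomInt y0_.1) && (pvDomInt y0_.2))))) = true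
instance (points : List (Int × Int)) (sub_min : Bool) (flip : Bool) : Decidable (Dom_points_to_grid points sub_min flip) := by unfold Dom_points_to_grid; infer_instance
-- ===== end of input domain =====

-- B never prefills a grid: it groups points into a dict row -> set of columns and emits each
-- row as sorted '#' marks separated by '.'-runs; equivalence is about the return value only.

-- ===== PORT A =====
-- make_grid specialised to the two-dimensional call site (fill = '.'); deepcopy of
-- immutable strings is the identity on values.
def pvMakeGrid1 (n : Int) : List String := (PySem.List.pyRange 0 n 1).map (fun _ => ".")
def pvMakeGrid2 (h w : Int) : List (List String) := (PySem.List.pyRange 0 h 1).map (fun _ => pvMakeGrid1 w)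
-- points_sub_min: points are pairs, so 'range(len(points[0]))' is {0, 1} and psub yields the
-- shifted pair; min() over an empty list (excluded by Pre_) is rendered total with .getD 0.
def pvPointsSubMin (points : List (Int × Int)) : List (Int × Int) :=
  let m0 := (PySem.List.min? (points.map (fun p => p.1)) (fun v => v)).getD 0
  let m1 := (PySem.List.min? (points.map (fun p => p.2)) (fun v => v)).getD 0
  points.map (fun p => (p.1 - m0, p.2 - m1))

def points_to_grid (points : List (Int × Int)) (sub_min : Bool) (flip : Bool) : List (List String) :=
  let pts1 := if sub_min then pvPointsSubMin points else points
  let pts2 := if !flip then pts1.map (fun p => (p.2, p.1)) else pts1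
  -- max() rendered total with .getD 0 (empty input is excluded by Pre_)
  let grid := pvMakeGrid2 ((PySem.List.max? (pts2.map (fun p => p.2)) (fun v => v)).getD 0 + 1)
                          ((PySem.List.max? (pts2.map (fun p => p.1)) (fun v => v)).getD 0 + 1)
  -- for x, y in points: grid[y][x] = '#'  (Python index semantics; in range under Pre_)
  pts2.foldl (fun g p =>
    PySem.List.pySetD g p.2 (PySem.List.pySetD (PySem.List.pyGetD g p.2 []) p.1 "#") ) grid

-- ===== PORT B =====
-- the inner 'for x in sorted(...)' loop of Source B with its (row, prev) state, then the tail run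
def pvFillStep (st : List String × Int) (x : Int) : List String × Int :=
  (st.1 ++ List.replicate (x - st.2 - 1).toNat "." ++ ["#"], x)
def pvFillRow (w : Int) (xs : List Int) : List String :=
  (xs.foldl pvFillStep ([], -1)).1
    ++ List.replicate (w - (xs.foldl pvFillStep ([], -1)).2 - 1).toNat "."

def points_to_grid_alt (points : List (Int × Int)) (sub_min : Bool) (flip : Bool) : List (List String) :=
  let pts1 := if sub_min then
      let mx := (PySem.List.min? (points.map (fun p => p.1)) (fun v => v)).getD 0
      let my := (PySem.List.min? (points.map (fun p => p.2)) (fun v => v)).getD 0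
      points.map (fun p => (p.1 - mx, p.2 - my))
    else points
  let pts2 := if !flip then pts1.map (fun p => (p.2, p.1)) else pts1
  let w := (PySem.List.max? (pts2.map (fun p => p.1)) (fun v => v)).getD 0 + 1
  let h := (PySem.List.max? (pts2.map (fun p => p.2)) (fun v => v)).getD 0 + 1
  -- rows.setdefault(y, set()).add(x)
  let rows : PySem.Dict Int (PySem.Set Int) :=
    pts2.foldl (fun d p => d.insert p.2 (PySem.Set.add (d.getD p.2 []) p.1)) PySem.Dict.empty
  (PySem.List.pyRange 0 h 1).map (fun y =>
    pvFillRow w (PySem.List.sorted (rows.getD y []) (fun v => v) false))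

-- ===== PRECONDITION & SPEC =====
-- Pre_ excludes the empty list (A raises IndexError/ValueError) and, when sub_min is false,
-- any input with a negative coordinate: there A either raises IndexError (point beyond the
-- grid) or marks a cell on the opposite edge through Python's negative-index wraparound —
-- an artefact of in-place index assignment; B's run-length rows do not reproduce it.
def Pre_points_to_grid (points : List (Int × Int)) (sub_min : Bool) (flip : Bool) : Prop :=
  points ≠ [] ∧ (sub_min = true ∨ ∀ p ∈ points, 0 ≤ p.1 ∧ 0 ≤ p.2)
instance (points : List (Int × Int)) (sub_min : Bool) (flip : Bool) : Decidable (Pre_points_to_grid points sub_min flip) := by unfold Pre_points_to_grid; infer_instance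

def pvWitness_points_to_grid : (List (Int × Int)) × Bool × Bool := ([(1, 2), (0, 0)], true, true)

def Spec_points_to_grid (points : List (Int × Int)) (sub_min : Bool) (flip : Bool) (out : List (List String)) : Prop := out = points_to_grid_alt points sub_min flip
instance (points : List (Int × Int)) (sub_min : Bool) (flip : Bool) (out : List (List String)) : Decidable (Spec_points_to_grid points sub_min flip out) := by unfold Spec_points_to_grid; infer_instance

-- ===== CLAIM (what is proved, stated in full; the proofs are below) =====
def Claim_equal_points_to_grid : Prop := ∀ (points : List (Int × Int)) (sub_min : Bool) (flip : Bool), Dom_points_to_grid points sub_min flip → Pre_points_to_grid points sub_min flip → Spec_points_to_grid points sub_min flip (points_to_grid points sub_min flip)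

-- ===== LEMMAS AND PROOFS =====

-- pyRange with lower bound 0 and step 1, in List.range form
theorem pvRange0 (h : Int) : PySem.List.pyRange 0 h 1 = (List.range h.toNat).map (Nat.cast : Nat → Int) := by
  rw [PySem.List.pyRange_one]
  simp only [Int.sub_zero]
  apply List.map_congr_left
  intro a ha
  simp

-- the grid whose cell (x, y) is '#' exactly where P holds
def pvGridOf (h w : Int) (P : Int × Int → Bool) : List (List String) :=
  (PySem.List.pyRange 0 h 1).map (fun y =>
    (PySem.List.pyRange 0 w 1).map (fun x => if P (x, y) then "#" else "."))

theorem pvGridOf_congr (h w : Int) (P Q : Int × Int → Bool)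
    (hPQ : ∀ x y : Int, 0 ≤ x → x < w → 0 ≤ y → y < h → P (x, y) = Q (x, y)) :
    pvGridOf h w P = pvGridOf h w Q := by
  unfold pvGridOf
  refine List.map_congr_left (fun y hy => List.map_congr_left (fun x hx => ?_))
  have hy' := (PySem.List.mem_pyRange_one.mp hy)
  have hx' := (PySem.List.mem_pyRange_one.mp hx)
  rw [hPQ x y hx'.1 hx'.2 hy'.1 hy'.2]

theorem pv_setCell (h w : Int) (P : Int × Int → Bool) (x y : Int)
    (hx : 0 ≤ x) (hx' : x < w) (hy : 0 ≤ y) (hy' : y < h) :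
    PySem.List.pySetD (pvGridOf h w P) y
      (PySem.List.pySetD (PySem.List.pyGetD (pvGridOf h w P) y []) x "#")
      = pvGridOf h w (fun q => P q || (q == (x, y))) := by
  have hget : PySem.List.pyGetD (pvGridOf h w P) y ([] : List String)
      = (PySem.List.pyRange 0 w 1).map (fun x => if P (x, y) then "#" else ".") := by
    unfold pvGridOf
    exact PySem.List.pyGetD_map_pyRange_of_nonneg _ h y [] hy hy'
  rw [hget, PySem.List.pySetD_of_nonneg _ _ hx, PySem.List.pySetD_of_nonneg _ _ hy]
  unfold pvGridOf
  rw [pvRange0 h, pvRange0 w, List.map_map, List.map_map]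
  apply List.ext_getElem
  · simp
  intro i h1 h2
  rw [List.getElem_set]
  by_cases hiy : y.toNat = i
  · rw [if_pos hiy]
    apply List.ext_getElem
    · simp
    intro j h3 h4
    rw [List.getElem_set]
    simp only [List.getElem_map, List.getElem_range, Function.comp]
    have hyi : (i : Int) = y := by omega
    by_cases hjx : x.toNat = j
    · have hxj : (j : Int) = x := by omega
      rw [if_pos hjx]
      simp [hxj, hyi]
    · have hxj : (j : Int) ≠ x := by omega
      rw [if_neg hjx]
      simp [hxj, ← hyi]
  · rw [if_neg hiy]
    simp only [List.getElem_map, List.getElem_range, Function.comp]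
    apply List.map_congr_left
    intro j hj
    have hyi : (i : Int) ≠ y := by omega
    simp [hyi]

theorem pv_foldl_mark (l : List (Int × Int)) (h w : Int) (P : Int × Int → Bool)
    (hb : ∀ p ∈ l, 0 ≤ p.1 ∧ p.1 < w ∧ 0 ≤ p.2 ∧ p.2 < h) :
    l.foldl (fun g p =>
        PySem.List.pySetD g p.2 (PySem.List.pySetD (PySem.List.pyGetD g p.2 []) p.1 "#"))
        (pvGridOf h w P)
      = pvGridOf h w (fun q => P q || l.contains q) := by
  induction l generalizing P with
  | nil =>
    simp only [List.foldl_nil]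
    exact pvGridOf_congr _ _ _ _ (fun x y _ _ _ _ => by simp)
  | cons p l ih =>
    obtain ⟨hp1, hp2, hp3, hp4⟩ := hb p (List.mem_cons_self ..)
    rw [List.foldl_cons, pv_setCell h w P p.1 p.2 hp1 hp2 hp3 hp4,
        ih (fun q => P q || (q == (p.1, p.2))) (fun q hq => hb q (List.mem_cons_of_mem _ hq))]
    refine pvGridOf_congr _ _ _ _ (fun a b _ _ _ _ => ?_)
    have hc : (((a, b) : Int × Int) == (p.1, p.2)) = (p == (a, b)) := by
      cases p; exact BEq.comm ..
    rw [List.contains_cons, Bool.or_assoc, hc]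

-- B-side: the gap-filling fold over a strictly increasing list of marked columns
theorem pv_fill_gen (w : Int) (xs : List Int) (prev : Int) (acc : List String)
    (hs : xs.Pairwise (· < ·)) (hlo : ∀ x ∈ xs, prev < x) (hhi : ∀ x ∈ xs, x < w) :
    (xs.foldl pvFillStep (acc, prev)).1
        ++ List.replicate (w - (xs.foldl pvFillStep (acc, prev)).2 - 1).toNat "."
      = acc ++ (PySem.List.pyRange (prev + 1) w 1).map
          (fun x => if xs.contains x then "#" else ".") := by
  induction xs generalizing prev acc with
  | nil =>
    simp only [List.foldl_nil]
    congr 1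
    have h1 : (PySem.List.pyRange (prev + 1) w 1).map
        (fun x => if ([] : List Int).contains x then "#" else ".")
        = (PySem.List.pyRange (prev + 1) w 1).map (fun _ => ("." : String)) :=
      List.map_congr_left (fun a _ => by simp)
    rw [h1, List.map_const', PySem.List.length_pyRange_one]
    congr 1
    omega
  | cons x xs ih =>
    rw [List.pairwise_cons] at hs
    obtain ⟨hx, hs'⟩ := hs
    have hpx : prev < x := hlo x (List.mem_cons_self ..)
    have hxw : x < w := hhi x (List.mem_cons_self ..)
    simp only [List.foldl_cons]
    have hstep : pvFillStep (acc, prev) x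
        = (acc ++ List.replicate (x - prev - 1).toNat "." ++ ["#"], x) := rfl
    rw [hstep, ih x _ hs' (fun z hz => hx z hz) (fun z hz => hhi z (List.mem_cons_of_mem _ hz))]
    have hsplit : PySem.List.pyRange (prev + 1) w 1
        = PySem.List.pyRange (prev + 1) (x + 1) 1 ++ PySem.List.pyRange (x + 1) w 1 :=
      PySem.List.pyRange_one_append _ _ _ (by omega) (by omega)
    have hsucc : PySem.List.pyRange (prev + 1) (x + 1) 1
        = PySem.List.pyRange (prev + 1) x 1 ++ [x] :=
      PySem.List.pyRange_one_succ_right (by omega)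
    rw [hsplit, hsucc]
    simp only [List.map_append]
    have hm1 : (PySem.List.pyRange (prev + 1) x 1).map
        (fun z => if (x :: xs).contains z then "#" else ".")
        = List.replicate (x - prev - 1).toNat "." := by
      have h1 : (PySem.List.pyRange (prev + 1) x 1).map
          (fun z => if (x :: xs).contains z then "#" else ".")
          = (PySem.List.pyRange (prev + 1) x 1).map (fun _ => ("." : String)) := by
        apply List.map_congr_left
        intro z hz
        have hz' := PySem.List.mem_pyRange_one.mp hz
        have hzx : z ≠ x := by omega
        have hzxs : z ∉ xs := fun hmem => absurd (hx z hmem) (by omega)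
        have : ¬ z ∈ (x :: xs) := by simp [hzx, hzxs]
        simp only [List.contains_cons]
        have e1 : (z == x) = false := by simp [hzx]
        have e2 : xs.contains z = false := by
          simp only [List.contains_eq_mem, decide_eq_false_iff_not]; exact hzxs
        rw [e1, e2]; rfl
      rw [h1, List.map_const']
      rw [PySem.List.length_pyRange_one]
      congr 1; omega
    have hm2 : ([x] : List Int).map (fun z => if (x :: xs).contains z then "#" else ".")
        = ["#"] := by simp
    have hm3 : (PySem.List.pyRange (x + 1) w 1).map
        (fun z => if (x :: xs).contains z then "#" else ".")
        = (PySem.List.pyRange (x + 1) w 1).map (fun z => if xs.contains z then "#" else ".") := by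
      apply List.map_congr_left
      intro z hz
      have hz' := PySem.List.mem_pyRange_one.mp hz
      have hzx : (z == x) = false := by simp; omega
      simp only [List.contains_cons, hzx, Bool.false_or]
    rw [hm1, hm2, hm3]
    simp [List.append_assoc]

-- the grouping dict: membership of x in the row-set at key y
theorem pv_group_mem (l : List (Int × Int)) (d : PySem.Dict Int (PySem.Set Int)) (x y : Int) :
    x ∈ (l.foldl (fun d p => d.insert p.2 (PySem.Set.add (d.getD p.2 []) p.1)) d).getD y []
      ↔ x ∈ d.getD y [] ∨ (x, y) ∈ l := by
  induction l generalizing d with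
  | nil => simp
  | cons p l ih =>
    obtain ⟨a, b⟩ := p
    rw [List.foldl_cons, ih, PySem.Dict.getD_insert]
    by_cases hy : y = b
    · subst hy
      rw [if_pos rfl, PySem.Set.mem_add]
      simp only [List.mem_cons, Prod.mk.injEq]
      tauto
    · rw [if_neg hy]
      simp only [List.mem_cons, Prod.mk.injEq]
      tauto

theorem pv_group_nodup (l : List (Int × Int)) (d : PySem.Dict Int (PySem.Set Int))
    (h : ∀ y, (d.getD y ([] : PySem.Set Int)).Nodup) :
    ∀ y, ((l.foldl (fun d p => d.insert p.2 (PySem.Set.add (d.getD p.2 []) p.1)) d).getD y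
      ([] : PySem.Set Int)).Nodup := by
  induction l generalizing d with
  | nil => exact h
  | cons p l ih =>
    rw [List.foldl_cons]
    apply ih
    intro y
    rw [PySem.Dict.getD_insert]
    by_cases hy : y = p.2
    · rw [if_pos hy]; exact PySem.Set.nodup_add _ _ (h p.2)
    · rw [if_neg hy]; exact h y

-- one row of B equals the membership row
theorem pv_row (w : Int) (s : List Int) (P : Int → Bool)
    (hnd : s.Nodup) (hmem : ∀ x : Int, x ∈ s ↔ P x = true) (hb : ∀ x ∈ s, 0 ≤ x ∧ x < w) :
    pvFillRow w (PySem.List.sorted s (fun v => v) false)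
      = (PySem.List.pyRange 0 w 1).map (fun x => if P x then "#" else ".") := by
  have hperm : (PySem.List.sorted s (fun v => v) false).Perm s := PySem.List.sorted_perm ..
  have hnd' : (PySem.List.sorted s (fun v => v) false).Nodup := hperm.symm.nodup hnd
  have hle : (PySem.List.sorted s (fun v => v) false).Pairwise (fun a b => a ≤ b) :=
    PySem.List.sorted_pairwise ..
  have hlt : (PySem.List.sorted s (fun v => v) false).Pairwise (· < ·) := by
    have := hle.and hnd'
    exact this.imp (fun h => lt_of_le_of_ne h.1 h.2)
  have hmem' : ∀ x, x ∈ PySem.List.sorted s (fun v => v) false ↔ x ∈ s :=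
    fun x => hperm.mem_iff
  unfold pvFillRow
  rw [pv_fill_gen w _ (-1) [] hlt
      (fun x hx => by have := (hb x ((hmem' x).mp hx)).1; omega)
      (fun x hx => (hb x ((hmem' x).mp hx)).2)]
  have h0 : (-1 : Int) + 1 = 0 := by omega
  rw [h0, List.nil_append]
  apply List.map_congr_left
  intro x _
  have : (PySem.List.sorted s (fun v => v) false).contains x = P x := by
    cases hP : P x with
    | true =>
      have : x ∈ PySem.List.sorted s (fun v => v) false := (hmem' x).mpr ((hmem x).mpr hP)
      simpa [List.contains_eq_mem]
    | false =>
      have : x ∉ PySem.List.sorted s (fun v => v) false := by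
        intro hx
        have := (hmem x).mp ((hmem' x).mp hx)
        rw [hP] at this; exact Bool.false_ne_true this
      simpa [List.contains_eq_mem]
  rw [this]

-- the common core: for nonempty q with nonnegative coordinates, A's fold equals B's rows
theorem pv_core (q : List (Int × Int)) (hne : q ≠ [])
    (hnn : ∀ p ∈ q, 0 ≤ p.1 ∧ 0 ≤ p.2) :
    q.foldl (fun g p =>
        PySem.List.pySetD g p.2 (PySem.List.pySetD (PySem.List.pyGetD g p.2 []) p.1 "#"))
      (pvMakeGrid2 ((PySem.List.max? (q.map (fun p => p.2)) (fun v => v)).getD 0 + 1)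
                   ((PySem.List.max? (q.map (fun p => p.1)) (fun v => v)).getD 0 + 1))
      = (PySem.List.pyRange 0 ((PySem.List.max? (q.map (fun p => p.2)) (fun v => v)).getD 0 + 1) 1).map (fun y =>
          pvFillRow ((PySem.List.max? (q.map (fun p => p.1)) (fun v => v)).getD 0 + 1)
            (PySem.List.sorted
              ((q.foldl (fun d p => d.insert p.2 (PySem.Set.add (d.getD p.2 []) p.1))
                PySem.Dict.empty).getD y []) (fun v => v) false)) := by
  obtain ⟨a, ha⟩ : ∃ a, PySem.List.max? (q.map (fun p => p.1)) (fun v => v) = some a := by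
    cases hmx : PySem.List.max? (q.map (fun p => p.1)) (fun v => v) with
    | none => rw [PySem.List.max?_eq_none_iff, List.map_eq_nil_iff] at hmx; exact absurd hmx hne
    | some a => exact ⟨a, rfl⟩
  obtain ⟨b, hb⟩ : ∃ b, PySem.List.max? (q.map (fun p => p.2)) (fun v => v) = some b := by
    cases hmx : PySem.List.max? (q.map (fun p => p.2)) (fun v => v) with
    | none => rw [PySem.List.max?_eq_none_iff, List.map_eq_nil_iff] at hmx; exact absurd hmx hne
    | some b => exact ⟨b, rfl⟩
  have hbound : ∀ p ∈ q, 0 ≤ p.1 ∧ p.1 < (PySem.List.max? (q.map (fun p => p.1)) (fun v => v)).getD 0 + 1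
      ∧ 0 ≤ p.2 ∧ p.2 < (PySem.List.max? (q.map (fun p => p.2)) (fun v => v)).getD 0 + 1 := by
    intro p hp
    refine ⟨(hnn p hp).1, ?_, (hnn p hp).2, ?_⟩
    · have := PySem.List.max?_isMax ha p.1 (List.mem_map.mpr ⟨p, hp, rfl⟩)
      rw [ha]; simp only [Option.getD_some]; omega
    · have := PySem.List.max?_isMax hb p.2 (List.mem_map.mpr ⟨p, hp, rfl⟩)
      rw [hb]; simp only [Option.getD_some]; omega
  have hgrid0 : pvMakeGrid2 ((PySem.List.max? (q.map (fun p => p.2)) (fun v => v)).getD 0 + 1)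
      ((PySem.List.max? (q.map (fun p => p.1)) (fun v => v)).getD 0 + 1)
      = pvGridOf ((PySem.List.max? (q.map (fun p => p.2)) (fun v => v)).getD 0 + 1)
                 ((PySem.List.max? (q.map (fun p => p.1)) (fun v => v)).getD 0 + 1)
                 (fun _ => false) := by
    simp [pvMakeGrid2, pvMakeGrid1, pvGridOf]
  rw [hgrid0, pv_foldl_mark _ _ _ _ hbound]
  unfold pvGridOf
  apply List.map_congr_left
  intro y _
  symm
  apply pv_row
  · exact pv_group_nodup q PySem.Dict.empty (fun _ => by simp [List.Nodup]) y
  · intro x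
    rw [pv_group_mem]
    simp only [PySem.Dict.getD_empty]
    constructor
    · rintro (h | h)
      · simp at h
      · simp [h]
    · intro h
      simp only [Bool.false_or, List.contains_eq_mem, decide_eq_true_eq] at h
      exact Or.inr h
  · intro x hx
    have hxq : (x, y) ∈ q := by
      have := (pv_group_mem q PySem.Dict.empty x y).mp hx
      rcases this with h | h
      · simp at h
      · exact h
    have := hbound (x, y) hxq
    exact ⟨this.1, this.2.1⟩

theorem pv_submin_nonneg (points : List (Int × Int)) (hne : points ≠ []) :
    ∀ p ∈ pvPointsSubMin points, 0 ≤ p.1 ∧ 0 ≤ p.2 := by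
  intro p hp
  simp only [pvPointsSubMin, List.mem_map] at hp
  obtain ⟨r, hr, rfl⟩ := hp
  obtain ⟨a, ha⟩ : ∃ a, PySem.List.min? (points.map (fun p => p.1)) (fun v => v) = some a := by
    cases hmx : PySem.List.min? (points.map (fun p => p.1)) (fun v => v) with
    | none => rw [PySem.List.min?_eq_none_iff, List.map_eq_nil_iff] at hmx; exact absurd hmx hne
    | some a => exact ⟨a, rfl⟩
  obtain ⟨b, hb⟩ : ∃ b, PySem.List.min? (points.map (fun p => p.2)) (fun v => v) = some b := by
    cases hmx : PySem.List.min? (points.map (fun p => p.2)) (fun v => v) with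
    | none => rw [PySem.List.min?_eq_none_iff, List.map_eq_nil_iff] at hmx; exact absurd hmx hne
    | some b => exact ⟨b, rfl⟩
  have h1 := PySem.List.min?_isMin ha r.1 (List.mem_map.mpr ⟨r, hr, rfl⟩)
  have h2 := PySem.List.min?_isMin hb r.2 (List.mem_map.mpr ⟨r, hr, rfl⟩)
  rw [ha, hb]
  simp only [Option.getD_some]
  constructor <;> omega

theorem pv_ne_swap_nonneg (l : List (Int × Int)) (h : ∀ p ∈ l, 0 ≤ p.1 ∧ 0 ≤ p.2) :
    ∀ p ∈ l.map (fun p => (p.2, p.1)), 0 ≤ p.1 ∧ 0 ≤ p.2 := by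
  intro p hp
  obtain ⟨r, hr, rfl⟩ := List.mem_map.mp hp
  exact ⟨(h r hr).2, (h r hr).1⟩

theorem pv_case_st (points : List (Int × Int)) (hne : points ≠ []) :
    points_to_grid points true true = points_to_grid_alt points true true := by
  unfold points_to_grid points_to_grid_alt
  simp only [Bool.not_true, Bool.false_eq_true, if_false, if_true]
  exact pv_core (pvPointsSubMin points)
    (by unfold pvPointsSubMin; simp [hne]) (pv_submin_nonneg points hne)

theorem pv_case_sf (points : List (Int × Int)) (hne : points ≠ []) :
    points_to_grid points true false = points_to_grid_alt points true false := by
  unfold points_to_grid points_to_grid_alt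
  simp only [Bool.not_false, if_true]
  have hsub : pvPointsSubMin points
      = points.map (fun p =>
          (p.1 - (PySem.List.min? (points.map (fun p => p.1)) (fun v => v)).getD 0,
           p.2 - (PySem.List.min? (points.map (fun p => p.2)) (fun v => v)).getD 0)) := rfl
  rw [hsub]
  have hne' : (points.map (fun p =>
          (p.1 - (PySem.List.min? (points.map (fun p => p.1)) (fun v => v)).getD 0,
           p.2 - (PySem.List.min? (points.map (fun p => p.2)) (fun v => v)).getD 0))).map (fun p => (p.2, p.1)) ≠ [] := by
    simp [hne]
  have hnn' : ∀ p ∈ (points.map (fun p =>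
          (p.1 - (PySem.List.min? (points.map (fun p => p.1)) (fun v => v)).getD 0,
           p.2 - (PySem.List.min? (points.map (fun p => p.2)) (fun v => v)).getD 0))).map (fun p => (p.2, p.1)), 0 ≤ p.1 ∧ 0 ≤ p.2 := by
    apply pv_ne_swap_nonneg
    rw [← hsub]
    exact pv_submin_nonneg points hne
  exact pv_core _ hne' hnn'

theorem pv_case_nt (points : List (Int × Int)) (hne : points ≠ [])
    (hnn : ∀ p ∈ points, 0 ≤ p.1 ∧ 0 ≤ p.2) :
    points_to_grid points false true = points_to_grid_alt points false true := by
  unfold points_to_grid points_to_grid_alt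
  simp only [Bool.not_true, Bool.false_eq_true, if_false]
  exact pv_core points hne hnn

theorem pv_case_nf (points : List (Int × Int)) (hne : points ≠ [])
    (hnn : ∀ p ∈ points, 0 ≤ p.1 ∧ 0 ≤ p.2) :
    points_to_grid points false false = points_to_grid_alt points false false := by
  unfold points_to_grid points_to_grid_alt
  simp only [Bool.not_false, Bool.false_eq_true, if_false, if_true]
  have hne' : points.map (fun p => (p.2, p.1)) ≠ [] := by simp [hne]
  have hnn' : ∀ p ∈ points.map (fun p => (p.2, p.1)), 0 ≤ p.1 ∧ 0 ≤ p.2 :=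
    pv_ne_swap_nonneg points hnn
  exact pv_core _ hne' hnn'

-- ===== VERDICT (by name: the statement is the Claim_ definition above) =====
theorem points_to_grid_spec : Claim_equal_points_to_grid := by
  intro points sub_min flip _ hpre
  obtain ⟨hne, hcase⟩ := hpre
  unfold Spec_points_to_grid
  have hnn : sub_min = false → ∀ p ∈ points, 0 ≤ p.1 ∧ 0 ≤ p.2 := by
    intro hsm
    cases hcase with
    | inl h => rw [hsm] at h; exact absurd h (by simp)
    | inr h => exact h
  cases sub_min with
  | true => cases flip with
    | true => exact pv_case_st points hne
    | false => exact pv_case_sf points hne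
  | false => cases flip with
    | true => exact pv_case_nt points hne (hnn rfl)
    | false => exact pv_case_nf points hne (hnn rfl)
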